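-- pv_equiv track=rewrite | github.com/AnaClaraZoppiSerpa/diffusion-studies-supporting-codes | GA_code/matrix_evaluation.py | poly_xor_cost
-- ===== SOURCE A (Python) =====
-- def poly_xor_cost(poly, ORDER):
--     mask = 1
--     set_bits = 0
--     current_bit = 0
--     while current_bit < ORDER:
--         if (poly & mask) != 0:
--             set_bits += 1
--         mask = mask << 1
--         current_bit += 1
--     return set_bits - 1
-- ===== SOURCE B (Python) =====
-- def poly_xor_cost(poly, ORDER):
--     count = 0
--     if ORDER > 0:
--         m = poly & ((1 << ORDER) - 1)
--         while m:
--             m &= m - 1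
--             count += 1
--     return count - 1
-- ===== Notes on version B (the rewrite author's own statement) =====
-- stated objective: faster
-- what changed: Replaced the per-bit-position scan over all ORDER positions with a single mask (poly & ((1<<ORDER)-1)) followed by Kernighan's m &= m-1 loop that iterates only once per set bit.
import Mathlib
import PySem

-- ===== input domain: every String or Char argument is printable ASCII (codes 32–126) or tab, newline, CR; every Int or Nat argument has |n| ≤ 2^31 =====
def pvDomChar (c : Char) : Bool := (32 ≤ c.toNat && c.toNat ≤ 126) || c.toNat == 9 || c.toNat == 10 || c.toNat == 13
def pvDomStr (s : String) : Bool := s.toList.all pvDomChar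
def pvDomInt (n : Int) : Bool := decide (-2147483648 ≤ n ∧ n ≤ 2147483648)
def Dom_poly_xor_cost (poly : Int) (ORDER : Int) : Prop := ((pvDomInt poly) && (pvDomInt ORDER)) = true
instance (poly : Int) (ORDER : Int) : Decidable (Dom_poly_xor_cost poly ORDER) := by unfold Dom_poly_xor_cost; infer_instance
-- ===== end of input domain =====

-- B replaces A's scan of every bit position below ORDER by one mask plus Kernighan's
-- m &= m-1 strip loop (one iteration per set bit); return values proved equal for all inputs.

-- ===== PORT A =====
-- the while loop: state (mask, set_bits, current_bit); terminates because ORDER - current_bit shrinks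
def pxLoop (poly : Int) (mask : Int) (set_bits : Int) (current_bit : Int) (ORDER : Int) : Int :=
  if current_bit < ORDER then
    pxLoop poly (mask <<< (1 : Nat))
      (if PySem.Int.band poly mask ≠ 0 then set_bits + 1 else set_bits)
      (current_bit + 1) ORDER
  else set_bits
termination_by (ORDER - current_bit).toNat
decreasing_by omega

def poly_xor_cost (poly : Int) (ORDER : Int) : Int :=
  pxLoop poly 1 0 0 ORDER - 1

-- ===== PORT B =====
-- 'while m: m &= m - 1; count += 1'; m = poly & ((1 << ORDER) - 1) is nonnegative, carried as a Nat
-- (exact: Python's & of any int with the nonnegative mask is nonnegative); '&' and '- 1' on it are Nat's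
def kernLoop (m : Nat) (count : Nat) : Nat :=
  if m = 0 then count else kernLoop (m &&& (m - 1)) (count + 1)
termination_by m
decreasing_by exact Nat.lt_of_le_of_lt Nat.and_le_right (by omega)

def poly_xor_cost_alt (poly : Int) (ORDER : Int) : Int :=
  (if 0 < ORDER then
    (kernLoop (PySem.Int.band poly (((1 : Int) <<< ORDER.toNat) - 1)).toNat 0 : Int)
  else 0) - 1

-- ===== PRECONDITION & SPEC =====
def Spec_poly_xor_cost (poly : Int) (ORDER : Int) (out : Int) : Prop := out = poly_xor_cost_alt poly ORDER
instance (poly : Int) (ORDER : Int) (out : Int) : Decidable (Spec_poly_xor_cost poly ORDER out) := by unfold Spec_poly_xor_cost; infer_instance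

-- ===== CLAIM (what is proved, stated in full; the proofs are below) =====
def Claim_equal_poly_xor_cost : Prop := ∀ (poly : Int) (ORDER : Int), Dom_poly_xor_cost poly ORDER → Spec_poly_xor_cost poly ORDER (poly_xor_cost poly ORDER)

-- ===== LEMMAS AND PROOFS =====

-- abstract value of A's loop: k remaining iterations, test poly & mask, double the mask
def gA : Nat → Int → Int → Nat
  | 0, _, _ => 0
  | k + 1, a, mask => (if PySem.Int.band a mask ≠ 0 then 1 else 0) + gA k a (mask * 2)

-- number of ones in a binary numeral (the common specification both loops meet)
def cnt (n : Nat) : Nat :=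
  if n = 0 then 0 else n % 2 + cnt (n / 2)
termination_by n
decreasing_by omega

-- count of the low k bits of an Int, by repeated floor halving
def cLow : Nat → Int → Nat
  | 0, _ => 0
  | k + 1, a => (PySem.Int.mod a 2).toNat + cLow k (PySem.Int.floordiv a 2)

theorem cnt_eq (n : Nat) : cnt n = n % 2 + cnt (n / 2) := by
  by_cases h : n = 0
  · subst h; rw [cnt]; simp
  · rw [cnt]; simp [h]

-- ---- A's loop equals gA ----
theorem pxLoop_eq_gA : ∀ (k : Nat) (c O : Int), (O - c).toNat = k →
    ∀ (a mask s : Int), pxLoop a mask s c O = s + (gA k a mask : Int) := by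
  intro k
  induction k with
  | zero =>
      intro c O hk a mask s
      rw [pxLoop.eq_def]
      have : ¬ c < O := by omega
      simp [this, gA]
  | succ k ih =>
      intro c O hk a mask s
      rw [pxLoop.eq_def]
      have hc : c < O := by omega
      simp only [hc, if_true]
      rw [ih (c + 1) O (by omega)]
      rw [Int.shiftLeft_eq]
      simp only [gA, pow_one]
      split_ifs <;> push_cast <;> ring


theorem pow2_toNat (m : Nat) : ((2 : Int) ^ m).toNat = 2 ^ m := by
  rw [show ((2 : Int) ^ m) = ((2 ^ m : Nat) : Int) by push_cast; ring]
  exact Int.toNat_natCast _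

theorem band_neg_nonneg (a b : Int) (ha : a < 0) (hb : 0 ≤ b) :
    PySem.Int.band a b = ((b.toNat - (b.toNat &&& (-a - 1).toNat) : Nat) : Int) := by
  unfold PySem.Int.band
  rw [if_neg (by omega), if_pos hb]

-- ---- the mask-doubling test halves the argument: poly & 2^(j+1) = 2 * ((poly // 2) & 2^j) ----
theorem band_two_pow_succ (a : Int) (j : Nat) :
    PySem.Int.band a (2 ^ (j + 1)) = 2 * PySem.Int.band (PySem.Int.floordiv a 2) (2 ^ j) := by
  have hfd : PySem.Int.floordiv a 2 = a / 2 := PySem.Int.floordiv_eq_ediv_of_pos (by omega)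
  have h1 : ((2 : Int) ^ (j + 1)).toNat = 2 ^ (j + 1) := pow2_toNat _
  have h2 : ((2 : Int) ^ j).toNat = 2 ^ j := pow2_toNat _
  by_cases ha : 0 ≤ a
  · have ha2 : (0 : Int) ≤ a / 2 := by omega
    rw [hfd, PySem.Int.band_of_nonneg ha (by positivity),
        PySem.Int.band_of_nonneg ha2 (by positivity)]
    have h3 : (a / 2).toNat = a.toNat / 2 := by omega
    rw [h1, h2, h3]
    rw [Nat.and_two_pow, Nat.and_two_pow, Nat.testBit_add_one]
    push_cast
    ring
  · rw [band_neg_nonneg a _ (by omega) (by positivity),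
        band_neg_nonneg _ _ (by rw [hfd]; omega) (by positivity)]
    have h3 : (-(PySem.Int.floordiv a 2) - 1).toNat = (-a - 1).toNat / 2 := by
      rw [hfd]; omega
    rw [h1, h2, h3]
    rw [Nat.two_pow_and, Nat.two_pow_and, Nat.testBit_add_one]
    rcases Bool.eq_false_or_eq_true (((-a - 1).toNat / 2).testBit j) with hb | hb <;> rw [hb]
    · simp
    · simp only [Bool.toNat_false, Nat.mul_zero, Nat.sub_zero]
      push_cast
      ring

theorem gA_shift : ∀ (k : Nat) (a : Int) (j : Nat),
    gA k a (2 ^ (j + 1)) = gA k (PySem.Int.floordiv a 2) (2 ^ j) := by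
  intro k
  induction k with
  | zero => intro a j; simp [gA]
  | succ k ih =>
      intro a j
      simp only [gA]
      have hcond : (PySem.Int.band a (2 ^ (j + 1)) ≠ 0) ↔
          (PySem.Int.band (PySem.Int.floordiv a 2) (2 ^ j) ≠ 0) := by
        rw [band_two_pow_succ]; constructor <;> intro h <;> omega
      have hrec : gA k a (2 ^ (j + 1) * 2) = gA k (PySem.Int.floordiv a 2) (2 ^ j * 2) := by
        have := ih a (j + 1)
        rw [pow_succ, pow_succ] at this
        exact this
      by_cases h : PySem.Int.band a (2 ^ (j + 1)) ≠ 0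
      · rw [if_pos h, if_pos (hcond.mp h), hrec]
      · rw [if_neg h, if_neg (fun hh => h (hcond.mpr hh)), hrec]

theorem mod_two_cases (a : Int) : PySem.Int.mod a 2 = 0 ∨ PySem.Int.mod a 2 = 1 := by
  have h1 := PySem.Int.mod_nonneg a (b := 2) (by omega)
  have h2 := PySem.Int.mod_lt a (b := 2) (by omega)
  omega

theorem gA_cLow : ∀ (k : Nat) (a : Int), gA k a 1 = cLow k a := by
  intro k
  induction k with
  | zero => intro a; rfl
  | succ k ih =>
      intro a
      simp only [gA, cLow]
      have hshift : gA k a (1 * 2) = gA k (PySem.Int.floordiv a 2) 1 := by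
        have := gA_shift k a 0
        simpa using this
      rw [hshift, ih, PySem.Int.band_one]
      rcases mod_two_cases a with h | h <;> rw [h] <;> norm_num

-- ---- poly & (2^(k+1)-1) splits as low bit + twice the masked half (both signs of poly) ----
theorem nat_and_low (n k : Nat) :
    n &&& (2 ^ (k + 1) - 1) = n % 2 + 2 * ((n / 2) &&& (2 ^ k - 1)) := by
  refine Nat.eq_of_testBit_eq fun i => ?_
  cases i with
  | zero =>
      rw [Nat.testBit_and, Nat.testBit_two_pow_sub_one, Nat.testBit_zero, Nat.testBit_zero]
      simp only [Nat.zero_lt_succ, decide_true, Bool.and_true]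
      rw [decide_eq_decide]
      omega
  | succ i =>
      rw [Nat.testBit_and, Nat.testBit_two_pow_sub_one, Nat.testBit_add_one]
      have hdiv : (n % 2 + 2 * ((n / 2) &&& (2 ^ k - 1))) / 2 = (n / 2) &&& (2 ^ k - 1) := by
        omega
      rw [Nat.testBit_add_one, hdiv, Nat.testBit_and, Nat.testBit_two_pow_sub_one]
      simp

theorem band_low_split (a : Int) (k : Nat) :
    PySem.Int.band a (2 ^ (k + 1) - 1) =
      PySem.Int.mod a 2 + 2 * PySem.Int.band (PySem.Int.floordiv a 2) (2 ^ k - 1) := by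
  have hfd : PySem.Int.floordiv a 2 = a / 2 := PySem.Int.floordiv_eq_ediv_of_pos (by omega)
  have hm : PySem.Int.mod a 2 = a % 2 := PySem.Int.mod_eq_emod_of_pos (by omega)
  have hC : ((2 : Int) ^ (k + 1) - 1).toNat = 2 ^ (k + 1) - 1 := by
    have : ((2 : Int) ^ (k + 1)).toNat = 2 ^ (k + 1) := pow2_toNat _
    omega
  have hC' : ((2 : Int) ^ k - 1).toNat = 2 ^ k - 1 := by
    have : ((2 : Int) ^ k).toNat = 2 ^ k := pow2_toNat _
    omega
  by_cases ha : 0 ≤ a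
  · have ha2 : (0 : Int) ≤ a / 2 := by omega
    rw [hfd, hm,
        PySem.Int.band_of_nonneg ha (by have h : (0:Int) < 2 ^ (k + 1) := pow_pos (by norm_num) _; omega),
        PySem.Int.band_of_nonneg ha2 (by have h : (0:Int) < 2 ^ k := pow_pos (by norm_num) _; omega), hC, hC']
    have h3 : (a / 2).toNat = a.toNat / 2 := by omega
    rw [h3, nat_and_low a.toNat k]
    have h4 : a % 2 = (a.toNat % 2 : Nat) := by omega
    rw [h4]
    push_cast
    ring
  · have e1 := band_neg_nonneg a (2 ^ (k + 1) - 1) (by omega)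
      (by have h1 := pow2_toNat (k + 1); have h2 : (1:Nat) ≤ 2 ^ (k + 1) := Nat.one_le_two_pow; omega)
    have e2 := band_neg_nonneg (PySem.Int.floordiv a 2) (2 ^ k - 1) (by rw [hfd]; omega)
      (by have h1 := pow2_toNat k; have h2 : (1:Nat) ≤ 2 ^ k := Nat.one_le_two_pow; omega)
    rw [e1, e2, hC, hC']
    set n : Nat := (-a - 1).toNat with hn
    have h3 : (-(PySem.Int.floordiv a 2) - 1).toNat = n / 2 := by rw [hfd]; omega
    rw [h3]
    have hcomm1 : (2 ^ (k + 1) - 1) &&& n = n &&& (2 ^ (k + 1) - 1) := Nat.land_comm _ _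
    have hcomm2 : (2 ^ k - 1) &&& (n / 2) = (n / 2) &&& (2 ^ k - 1) := Nat.land_comm _ _
    rw [hcomm1, hcomm2, nat_and_low n k]
    have hle : (n / 2) &&& (2 ^ k - 1) ≤ 2 ^ k - 1 := Nat.and_le_right
    have hm2 : a % 2 = 1 - ((n % 2 : Nat) : Int) := by omega
    have hpow : (1 : Nat) ≤ 2 ^ k := Nat.one_le_two_pow
    rw [hm]
    omega

-- ---- the masked value's popcount is cLow ----
theorem cnt_band (k : Nat) (a : Int) :
    cnt (PySem.Int.band a (2 ^ k - 1)).toNat = cLow k a := by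
  induction k generalizing a with
  | zero =>
      simp only [pow_zero, sub_self, PySem.Int.band_zero, cLow]
      rw [cnt]; simp
  | succ k ih =>
      rw [band_low_split]
      have hm := mod_two_cases a
      have hB : 0 ≤ PySem.Int.band (PySem.Int.floordiv a 2) (2 ^ k - 1) := by
        rw [PySem.Int.band_comm]
        exact PySem.Int.band_nonneg_of_nonneg_left _
          (by have h : (0:Int) < 2 ^ k := pow_pos (by norm_num) _; omega)
      obtain ⟨B, hBeq, hB0⟩ : ∃ B : Int, PySem.Int.band (PySem.Int.floordiv a 2) (2 ^ k - 1) = B ∧ 0 ≤ B :=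
        ⟨_, rfl, hB⟩
      rw [hBeq]
      have e1 : (PySem.Int.mod a 2 + 2 * B).toNat % 2 = (PySem.Int.mod a 2).toNat := by omega
      have e2 : (PySem.Int.mod a 2 + 2 * B).toNat / 2 = B.toNat := by omega
      rw [cnt_eq, e1, e2, ← hBeq, ih (PySem.Int.floordiv a 2)]
      simp [cLow]

-- ---- Kernighan's loop counts ones ----
theorem kernLoop_acc (m : Nat) : ∀ c, kernLoop m c = c + kernLoop m 0 := by
  induction m using Nat.strong_induction_on with
  | _ m ih =>
      intro c
      by_cases h : m = 0
      · subst h; simp [kernLoop]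
      · have hlt : m &&& (m - 1) < m := Nat.lt_of_le_of_lt Nat.and_le_right (by omega)
        rw [kernLoop]
        conv_rhs => rw [kernLoop]
        simp only [h, if_false]
        rw [ih _ hlt (c + 1), ih _ hlt 1]
        omega

theorem and_pred_two_mul (t : Nat) (ht : 1 ≤ t) :
    (2 * t) &&& (2 * t - 1) = 2 * (t &&& (t - 1)) := by
  refine Nat.eq_of_testBit_eq fun i => ?_
  cases i with
  | zero =>
      rw [Nat.testBit_and, Nat.testBit_zero, Nat.testBit_zero, Nat.testBit_zero]
      have h1 : 2 * t % 2 = 0 := by omega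
      have h2 : 2 * (t &&& (t - 1)) % 2 = 0 := by omega
      simp [h1, h2]
  | succ i =>
      rw [Nat.testBit_and, Nat.testBit_add_one, Nat.testBit_add_one, Nat.testBit_add_one]
      have h1 : 2 * t / 2 = t := by omega
      have h2 : (2 * t - 1) / 2 = t - 1 := by omega
      have h3 : 2 * (t &&& (t - 1)) / 2 = t &&& (t - 1) := by omega
      rw [h1, h2, h3, Nat.testBit_and]

theorem and_pred_odd (t : Nat) : (2 * t + 1) &&& (2 * t) = 2 * t := by
  refine Nat.eq_of_testBit_eq fun i => ?_
  cases i with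
  | zero =>
      rw [Nat.testBit_and, Nat.testBit_zero, Nat.testBit_zero]
      have h1 : (2 * t + 1) % 2 = 1 := by omega
      have h2 : 2 * t % 2 = 0 := by omega
      simp [h1, h2]
  | succ i =>
      rw [Nat.testBit_and, Nat.testBit_add_one, Nat.testBit_add_one]
      have h1 : (2 * t + 1) / 2 = t := by omega
      have h2 : 2 * t / 2 = t := by omega
      rw [h1, h2, Bool.and_self]

theorem kernLoop_two_mul (t : Nat) : kernLoop (2 * t) 0 = kernLoop t 0 := by
  induction t using Nat.strong_induction_on with
  | _ t ih =>
      by_cases h : t = 0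
      · subst h; rfl
      · have ht : 1 ≤ t := by omega
        have hlt : t &&& (t - 1) < t := Nat.lt_of_le_of_lt Nat.and_le_right (by omega)
        rw [kernLoop, if_neg (by omega : ¬ (2 * t = 0)),
            and_pred_two_mul t ht, kernLoop_acc, ih _ hlt]
        conv_rhs => rw [kernLoop]
        rw [if_neg h, kernLoop_acc (t &&& (t - 1)) (0 + 1)]

theorem kernLoop_cnt (m : Nat) : kernLoop m 0 = cnt m := by
  induction m using Nat.strong_induction_on with
  | _ m ih =>
      by_cases h : m = 0
      · subst h; rw [kernLoop, cnt]; simp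
      · rcases Nat.even_or_odd m with ⟨t, ht⟩ | ⟨t, ht⟩
        · have ht' : m = 2 * t := by omega
          subst ht'
          rw [kernLoop_two_mul, ih t (by omega)]
          conv_rhs => rw [cnt_eq]
          have h1 : 2 * t % 2 = 0 := by omega
          have h2 : 2 * t / 2 = t := by omega
          rw [h1, h2]
          omega
        · subst ht
          rw [kernLoop, if_neg (by omega : ¬ (2 * t + 1 = 0))]
          have hsub : 2 * t + 1 - 1 = 2 * t := by omega
          rw [hsub, and_pred_odd, kernLoop_acc, kernLoop_two_mul, ih t (by omega)]
          conv_rhs => rw [cnt_eq]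
          have h1 : (2 * t + 1) % 2 = 1 := by omega
          have h2 : (2 * t + 1) / 2 = t := by omega
          rw [h1, h2]

-- ===== VERDICT (by name: the statement is the Claim_ definition above) =====
theorem poly_xor_cost_spec : Claim_equal_poly_xor_cost := by
  intro poly ORDER _
  unfold Spec_poly_xor_cost poly_xor_cost poly_xor_cost_alt
  rw [pxLoop_eq_gA ORDER.toNat 0 ORDER (by omega), gA_cLow]
  by_cases hO : 0 < ORDER
  · simp only [hO, if_true]
    rw [Int.shiftLeft_eq, one_mul, kernLoop_cnt, cnt_band ORDER.toNat poly]
    ring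
  · simp only [hO, if_false]
    have h0 : ORDER.toNat = 0 := by omega
    rw [h0]
    simp [cLow]
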